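-- pv_equiv track=rewrite | github.com/will-norris/advent-of-code | day_3/spiral_memory.py | create_map_of_numbers_to_coordinates
-- ===== SOURCE A (Python) =====
-- def create_map_of_numbers_to_coordinates(position, number_limit):
-- 	'''
-- 	Starting from a central point of [0,0] map numbers to coordinates by spiraling
-- 	outwards in an anticlockwise direction.
-- 	'''
-- 	direction = 0
-- 	number = 1
-- 	counter = 1
-- 	step = 1
--
-- 	numbers_to_locations_map = {}
--
-- 	for i in range(1, number_limit+1):
-- 		numbers_to_locations_map[number] = position[:]
--
-- 		counter, step, direction, number = step_and_change_position(position, counter, step, direction, number)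
--
-- 	return numbers_to_locations_map
--
-- def step_and_change_position(position, counter, step, direction, number):
-- 	"""
-- 	Sorta hacky - there is probably a better way of doing this. It works by making 'steps' around
-- 	the grid of coordinates. The algorithm works on the logic that when spiralling outwards you make
-- 	movements composed of steps and a direction. i.e. Starting at position [0,0] you make a movement left of 1 step.
-- 	Next you make a movement upwards of 1 step. After making these 2 movements the number of steps
-- 	increases by 1. When making a movement to the right you will now make 2 steps to clear position
-- 	[0,0] underneath you. Next you move downwards 2 steps. The pattern here is that each time you
-- 	make 2 movements in a particular direction the number of steps increases by 1. Thus you have: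
-- 	Left: 1
-- 	Up: 1
-- 	Right: 2
-- 	Down: 2
-- 	Left: 3
-- 	Up: 3
-- 	And so on. Counter is used to see if you have made all of the steps for the current movement.
-- 	Once the movement is complete the counter resets and step increments.
--
-- 	Args:
-- 		position (list): Current position in the grid (starts at [0, 0])
-- 		counter (int): Used to keep track of how many steps have been made
-- 		step (int): How many steps need to be made in the current movement.
-- 	"""
-- 	if direction == 0:
-- 		position[0]+=1
-- 		if counter == step:
-- 			counter = 0
-- 			# change direction from left to up
-- 			direction+=1
-- 	elif direction == 1:
-- 		position[1]+=1
-- 		if counter == step: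
-- 			counter = 0
-- 			# change direction from up to right
-- 			direction+=1
-- 			# changing direction means 1 extra step
-- 			step+=1
-- 	elif direction == 2:
-- 		position[0]-=1
-- 		if counter == step:
-- 			counter = 0
--
-- 			direction+=1
-- 	elif direction == 3:
-- 		position[1]-=1
-- 		if counter == step:
-- 			counter = 0
-- 			#
-- 			direction = 0
-- 			step+=1
--
-- 	counter+=1
-- 	number +=1
--
-- 	return counter, step, direction, number
-- ===== SOURCE B (Python) =====
-- def create_map_of_numbers_to_coordinates(position, number_limit):
-- 	'''
-- 	Starting from a central point of [0,0] map numbers to coordinates by spiraling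
-- 	outwards in an anticlockwise direction.
--
-- 	Segment-based rewrite: directions cycle +x, +y, -x, -y with run lengths
-- 	1, 1, 2, 2, 3, 3, ...; each segment is walked in one inner loop. Like the
-- 	original, `position` is mutated in place one step past the last stored number.
-- 	'''
-- 	numbers_to_locations_map = {}
-- 	deltas = ((0, 1), (1, 1), (0, -1), (1, -1))
-- 	number = 1
-- 	d = 0
-- 	run = 1
-- 	while number <= number_limit:
-- 		axis, delta = deltas[d]
-- 		for _ in range(min(run, number_limit - number + 1)):
-- 			numbers_to_locations_map[number] = position[:]
-- 			position[axis] += delta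
-- 			number += 1
-- 		d = (d + 1) % 4
-- 		if d % 2 == 0:
-- 			run += 1
-- 	return numbers_to_locations_map
-- ===== Notes on version B (the rewrite author's own statement) =====
-- stated objective: alternative
-- what changed: Replaces the per-step four-branch state machine (counter/step reset logic inside a helper called once per number) with a segment loop: a direction/delta table cycled modulo 4 and run lengths 1,1,2,2,3,3,... walked by an inner loop per segment.
import Mathlib
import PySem

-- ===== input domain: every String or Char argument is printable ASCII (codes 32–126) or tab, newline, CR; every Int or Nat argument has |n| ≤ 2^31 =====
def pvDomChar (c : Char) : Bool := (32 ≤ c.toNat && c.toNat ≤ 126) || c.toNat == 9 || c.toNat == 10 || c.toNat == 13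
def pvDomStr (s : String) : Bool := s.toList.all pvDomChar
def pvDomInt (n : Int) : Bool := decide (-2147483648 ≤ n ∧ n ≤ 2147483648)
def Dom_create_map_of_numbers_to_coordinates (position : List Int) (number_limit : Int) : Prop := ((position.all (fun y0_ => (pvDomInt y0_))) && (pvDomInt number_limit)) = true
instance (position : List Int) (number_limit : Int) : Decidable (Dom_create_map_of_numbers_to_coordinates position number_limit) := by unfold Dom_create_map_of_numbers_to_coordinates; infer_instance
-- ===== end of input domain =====

-- B replaces the per-step four-branch state machine with a direction-table segment
-- loop (run lengths 1,1,2,2,3,3,...); equivalence is about the RETURN value only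
-- (both Pythons mutate `position` in place in the same way).

-- ===== PORT A =====

-- position[i] += d  (index always in range under Pre_)
def pvIncAt (xs : List Int) (i : Nat) (d : Int) : List Int := xs.set i (xs.getD i 0 + d)

def step_and_change_position (position : List Int) (counter step direction number : Int) :
    List Int × Int × Int × Int × Int :=
  let (position, counter, step, direction) :=
    if direction = 0 then
      let position := pvIncAt position 0 1
      if counter = step then (position, 0, step, direction + 1)
      else (position, counter, step, direction)
    else if direction = 1 then
      let position := pvIncAt position 1 1
      if counter = step then (position, 0, step + 1, direction + 1)
      else (position, counter, step, direction)
    else if direction = 2 then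
      let position := pvIncAt position 0 (-1)
      if counter = step then (position, 0, step, direction + 1)
      else (position, counter, step, direction)
    else if direction = 3 then
      let position := pvIncAt position 1 (-1)
      if counter = step then (position, 0, step + 1, 0)
      else (position, counter, step, direction)
    else (position, counter, step, direction)
  (position, counter + 1, step, direction, number + 1)

-- body of A's `for i in range(1, number_limit+1)` loop
def pvABody (s : List Int × Int × Int × Int × Int × PySem.Dict Int (List Int)) (_i : Int) :
    List Int × Int × Int × Int × Int × PySem.Dict Int (List Int) :=
  let m := s.2.2.2.2.2.insert s.2.2.2.2.1 s.1
  let t := step_and_change_position s.1 s.2.1 s.2.2.1 s.2.2.2.1 s.2.2.2.2.1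
  (t.1, t.2.1, t.2.2.1, t.2.2.2.1, t.2.2.2.2, m)

def create_map_of_numbers_to_coordinates (position : List Int) (number_limit : Int) :
    List (Int × List Int) :=
  ((PySem.List.pyRange 1 (number_limit + 1) 1).foldl pvABody
    (position, 1, 1, 0, 1, PySem.Dict.empty)).2.2.2.2.2.items

-- ===== PORT B =====

-- deltas = ((0,1),(1,1),(0,-1),(1,-1))
def pvDeltas : List (Nat × Int) := [(0, 1), (1, 1), (0, -1), (1, -1)]

-- inner `for _ in range(cnt)` loop of one segment
def pvRunSeg : Nat → List Int → Int → Nat → Int → PySem.Dict Int (List Int) →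
    List Int × Int × PySem.Dict Int (List Int)
  | 0, pos, number, _, _, m => (pos, number, m)
  | n + 1, pos, number, axis, delta, m =>
      pvRunSeg n (pvIncAt pos axis delta) (number + 1) axis delta (m.insert number pos)

-- outer `while number <= number_limit` loop (fuel bounds the segment count)
def pvSegLoop : Nat → List Int → Int → Int → Int → Int → PySem.Dict Int (List Int) →
    PySem.Dict Int (List Int)
  | 0, _, _, _, _, _, m => m
  | fuel + 1, pos, number, limit, d, run, m =>
      if number ≤ limit then
        let ad := pvDeltas.getD d.toNat (0, 0)
        let r := pvRunSeg (min run (limit - number + 1)).toNat pos number ad.1 ad.2 m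
        let d' := PySem.Int.mod (d + 1) 4
        pvSegLoop fuel r.1 r.2.1 limit d' (if PySem.Int.mod d' 2 = 0 then run + 1 else run) r.2.2
      else m

def create_map_of_numbers_to_coordinates_alt (position : List Int) (number_limit : Int) :
    List (Int × List Int) :=
  (pvSegLoop number_limit.toNat position 1 number_limit 0 1 PySem.Dict.empty).items

-- ===== PRECONDITION & SPEC =====
-- Pre_ excludes exactly the inputs where A raises IndexError: the walk touches
-- position[0] from the first step and position[1] from the second, so a list
-- shorter than 2 (or than 1 when number_limit = 1) makes A crash.
def Pre_create_map_of_numbers_to_coordinates (position : List Int) (number_limit : Int) : Prop :=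
  number_limit ≤ 0 ∨ 2 ≤ position.length ∨ (number_limit = 1 ∧ 1 ≤ position.length)
instance (position : List Int) (number_limit : Int) : Decidable (Pre_create_map_of_numbers_to_coordinates position number_limit) := by unfold Pre_create_map_of_numbers_to_coordinates; infer_instance

def pvWitness_create_map_of_numbers_to_coordinates : List Int × Int := ([0, 0], 10)

def Spec_create_map_of_numbers_to_coordinates (position : List Int) (number_limit : Int) (out : List (Int × List Int)) : Prop := out = create_map_of_numbers_to_coordinates_alt position number_limit
instance (position : List Int) (number_limit : Int) (out : List (Int × List Int)) : Decidable (Spec_create_map_of_numbers_to_coordinates position number_limit out) := by unfold Spec_create_map_of_numbers_to_coordinates; infer_instance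

-- ===== CLAIM (what is proved, stated in full; the proofs are below) =====
def Claim_equal_create_map_of_numbers_to_coordinates : Prop := ∀ (position : List Int) (number_limit : Int), Dom_create_map_of_numbers_to_coordinates position number_limit → Pre_create_map_of_numbers_to_coordinates position number_limit → Spec_create_map_of_numbers_to_coordinates position number_limit (create_map_of_numbers_to_coordinates position number_limit)

-- ===== LEMMAS AND PROOFS =====

-- A's loop, restated as structural recursion on the iteration count
def pvALoop : Nat → List Int → Int → Int → Int → Int → PySem.Dict Int (List Int) →
    PySem.Dict Int (List Int)
  | 0, _, _, _, _, _, m => m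
  | n + 1, pos, c, st, dir, num, m =>
      let m' := m.insert num pos
      let t := step_and_change_position pos c st dir num
      pvALoop n t.1 t.2.1 t.2.2.1 t.2.2.2.1 t.2.2.2.2 m'

lemma pvFold_eq_aLoop (l : List Int) :
    ∀ pos (c st dir num : Int) m,
      ((l.foldl pvABody (pos, c, st, dir, num, m)).2.2.2.2.2)
        = pvALoop l.length pos c st dir num m := by
  induction l with
  | nil => intro pos c st dir num m; rfl
  | cons x xs ih =>
      intro pos c st dir num m
      simp only [List.foldl_cons, List.length_cons, pvALoop, pvABody]
      exact ih _ _ _ _ _ _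

lemma pvRunSeg_num (n : Nat) :
    ∀ pos (num : Int) a d m, (pvRunSeg n pos num a d m).2.1 = num + n := by
  induction n with
  | zero => intro pos num a d m; simp [pvRunSeg]
  | succ k ih => intro pos num a d m; simp [pvRunSeg, ih]; ring

lemma pvSegLoop_stop (f : Nat) (pos : List Int) (num limit d run : Int)
    (m : PySem.Dict Int (List Int)) (h : limit < num) :
    pvSegLoop f pos num limit d run m = m := by
  cases f with
  | zero => rfl
  | succ k => simp [pvSegLoop, not_le.mpr h]

-- a truncated segment: fewer iterations remain than steps in the current run
lemma pvTrunc (n : Nat) :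
    ∀ pos (c st num dir : Int) m,
      (dir = 0 ∨ dir = 1 ∨ dir = 2 ∨ dir = 3) → (c + n ≤ st) →
      pvALoop n pos c st dir num m =
        (pvRunSeg n pos num (pvDeltas.getD dir.toNat (0, 0)).1
          (pvDeltas.getD dir.toNat (0, 0)).2 m).2.2 := by
  induction n with
  | zero => intro pos c st num dir m _ _; rfl
  | succ k ih =>
      intro pos c st num dir m hd hle
      have hne : c ≠ st := by omega
      rcases hd with rfl | rfl | rfl | rfl <;>
        · simp only [pvALoop, pvRunSeg, step_and_change_position, if_neg hne]
          simp only [pvDeltas]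
          rw [ih _ _ _ _ _ _ (by simp) (by push_cast at hle ⊢; omega)]
          simp [pvDeltas]

-- a full segment: exactly st - c + 1 = j + 1 steps finish the current run
lemma pvFull (j : Nat) :
    ∀ (k : Nat) pos (c st num dir : Int) m,
      (dir = 0 ∨ dir = 1 ∨ dir = 2 ∨ dir = 3) → 1 ≤ c → c ≤ st → (st - c).toNat = j →
      pvALoop (j + 1 + k) pos c st dir num m =
        pvALoop k
          (pvRunSeg (j + 1) pos num (pvDeltas.getD dir.toNat (0, 0)).1
            (pvDeltas.getD dir.toNat (0, 0)).2 m).1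
          1
          (if PySem.Int.mod (PySem.Int.mod (dir + 1) 4) 2 = 0 then st + 1 else st)
          (PySem.Int.mod (dir + 1) 4)
          (pvRunSeg (j + 1) pos num (pvDeltas.getD dir.toNat (0, 0)).1
            (pvDeltas.getD dir.toNat (0, 0)).2 m).2.1
          (pvRunSeg (j + 1) pos num (pvDeltas.getD dir.toNat (0, 0)).1
            (pvDeltas.getD dir.toNat (0, 0)).2 m).2.2 := by
  induction j with
  | zero =>
      intro k pos c st num dir m hd h1 h2 hj
      have hc : c = st := by omega
      subst hc
      have h1k : 1 + k = k + 1 := by omega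
      rw [h1k]
      rcases hd with rfl | rfl | rfl | rfl <;>
        simp [pvALoop, pvRunSeg, step_and_change_position, pvDeltas, PySem.Int.mod]
  | succ j ih =>
      intro k pos c st num dir m hd h1 h2 hj
      have hne : c ≠ st := by omega
      have hstep : (j + 1) + 1 + k = (j + 1 + k) + 1 := by ring
      rw [hstep]
      rcases hd with rfl | rfl | rfl | rfl
      · simp only [pvALoop, step_and_change_position, if_neg hne]
        norm_num
        rw [ih k (pvIncAt pos 0 1) (c + 1) st (num + 1) 0 (m.insert num pos)
          (Or.inl rfl) (by omega) (by omega) (by omega)]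
        simp [pvRunSeg, pvDeltas]
      · simp only [pvALoop, step_and_change_position, if_neg hne]
        norm_num
        rw [ih k (pvIncAt pos 1 1) (c + 1) st (num + 1) 1 (m.insert num pos)
          (Or.inr (Or.inl rfl)) (by omega) (by omega) (by omega)]
        simp [pvRunSeg, pvDeltas]
      · simp only [pvALoop, step_and_change_position, if_neg hne]
        norm_num
        rw [ih k (pvIncAt pos 0 (-1)) (c + 1) st (num + 1) 2 (m.insert num pos)
          (Or.inr (Or.inr (Or.inl rfl))) (by omega) (by omega) (by omega)]
        simp [pvRunSeg, pvDeltas]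
      · simp only [pvALoop, step_and_change_position, if_neg hne]
        norm_num
        rw [ih k (pvIncAt pos 1 (-1)) (c + 1) st (num + 1) 3 (m.insert num pos)
          (Or.inr (Or.inr (Or.inr rfl))) (by omega) (by omega) (by omega)]
        simp [pvRunSeg, pvDeltas]

lemma pvMain (limit : Int) (f : Nat) :
    ∀ (n : Nat) pos (num dir run : Int) m,
      (dir = 0 ∨ dir = 1 ∨ dir = 2 ∨ dir = 3) → 1 ≤ run → n ≤ f →
      n = (limit + 1 - num).toNat →
      pvALoop n pos 1 run dir num m = pvSegLoop f pos num limit dir run m := by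
  induction f with
  | zero =>
      intro n pos num dir run m _ _ hnf hn
      have : n = 0 := by omega
      subst this; rfl
  | succ f ih =>
      intro n pos num dir run m hd hrun hnf hn
      by_cases hnum : num ≤ limit
      · have hnpos : 1 ≤ n := by omega
        by_cases hcase : run ≤ limit - num + 1
        · -- full segment
          have hmin : min run (limit - num + 1) = run := min_eq_left hcase
          have hcnt : run.toNat ≤ n := by omega
          have hsplit : n = (run.toNat - 1) + 1 + (n - run.toNat) := by omega
          rw [hsplit, pvFull (run.toNat - 1) (n - run.toNat) pos 1 run num dir m hd
            le_rfl hrun (by omega)]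
          have hrt : run.toNat - 1 + 1 = run.toNat := by omega
          rw [hrt]
          simp only [pvSegLoop, if_pos hnum, hmin]
          refine ih _ _ _ _ _ _ ?_ ?_ (by omega) ?_
          · rcases hd with rfl | rfl | rfl | rfl <;> decide
          · split <;> omega
          · rw [pvRunSeg_num]; omega
        · -- truncated segment: the loop runs out mid-run
          have hmin : min run (limit - num + 1) = limit - num + 1 :=
            min_eq_right (by omega)
          have hle : (1 : Int) + n ≤ run := by omega
          rw [pvTrunc n pos 1 run num dir m hd hle]
          simp only [pvSegLoop, if_pos hnum, hmin]
          have hcnt : (limit - num + 1).toNat = n := by omega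
          rw [hcnt, pvSegLoop_stop _ _ _ _ _ _ _ (by rw [pvRunSeg_num]; omega)]
      · -- num > limit: no iterations remain on either side
        have : n = 0 := by omega
        subst this
        exact (pvSegLoop_stop _ _ _ _ _ _ _ (by omega)).symm

theorem pv_spec_aux (position : List Int) (number_limit : Int) :
    create_map_of_numbers_to_coordinates position number_limit
      = create_map_of_numbers_to_coordinates_alt position number_limit := by
  unfold create_map_of_numbers_to_coordinates create_map_of_numbers_to_coordinates_alt
  rw [pvFold_eq_aLoop]
  rw [PySem.List.length_pyRange_one]
  have h1 : (number_limit + 1 - 1).toNat = number_limit.toNat := by omega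
  rw [h1]
  rw [pvMain number_limit number_limit.toNat number_limit.toNat position 1 0 1
    PySem.Dict.empty (Or.inl rfl) le_rfl le_rfl (by omega)]

-- ===== VERDICT (by name: the statement is the Claim_ definition above) =====
theorem create_map_of_numbers_to_coordinates_spec : Claim_equal_create_map_of_numbers_to_coordinates := by
  intro position number_limit _ _
  exact pv_spec_aux position number_limit
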